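-- pv_equiv track=rewrite | github.com/tryphon77/ShinoPy | tools/make_objects_list_3.py | make_table
-- ===== SOURCE A (Python) =====
-- def make_table(listoflists):
-- 	header_sz = len(listoflists)
-- 	header = []
-- 	data = []
-- 	matches = {}
-- 	for t in listoflists:
-- 		if t not in matches:
-- 			matches[t] = header_sz + len(data)
-- 			data += list(t) + [0xFF]
-- 		header += [matches[t]]
--
-- 	return header + data
-- ===== SOURCE B (Python) =====
-- def make_table(listoflists):
--     n = len(listoflists)
--     # offs[j] = the offset the row at position j would carry if j is its first occurrence:
--     # n plus the total size (len + 1 terminator) of the distinct rows seen strictly before j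
--     offs = []
--     acc = n
--     for i, t in enumerate(listoflists):
--         offs.append(acc)
--         if t not in listoflists[:i]:
--             acc += len(t) + 1
--     header = [offs[listoflists.index(t)] for t in listoflists]
--     data = [x for i, t in enumerate(listoflists) if t not in listoflists[:i] for x in list(t) + [0xFF]]
--     return header + data
-- ===== Notes on version B (the rewrite author's own statement) =====
-- stated objective: alternative
-- what changed: Drops A's dict-of-offsets interleaved pass entirely: B canonicalises each row by its first-occurrence position (listoflists.index / prefix-membership tests), precomputes a positional prefix-sum table offs of record sizes, reads the header off that table, and emits the data as a filtered comprehension over first occurrences.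
import Mathlib
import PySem

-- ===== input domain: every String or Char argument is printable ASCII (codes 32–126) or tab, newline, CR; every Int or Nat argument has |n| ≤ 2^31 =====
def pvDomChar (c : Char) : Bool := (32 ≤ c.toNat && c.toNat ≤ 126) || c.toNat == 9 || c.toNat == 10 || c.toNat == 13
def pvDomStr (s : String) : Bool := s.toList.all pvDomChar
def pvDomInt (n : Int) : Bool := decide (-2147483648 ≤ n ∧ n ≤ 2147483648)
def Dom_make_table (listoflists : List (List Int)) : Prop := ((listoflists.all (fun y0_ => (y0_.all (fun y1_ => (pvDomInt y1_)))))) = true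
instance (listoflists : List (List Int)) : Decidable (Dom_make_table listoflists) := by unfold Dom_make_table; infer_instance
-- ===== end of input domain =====

-- B replaces A's interleaved dict-of-offsets pass by a dict-free structure: rows are canonicalised by
-- their first-occurrence position, a positional prefix-sum table gives the offsets, and the data is a
-- filtered concatenation over first occurrences; objective: alternative (B is not faster).

-- ===== PORT A =====
-- state = (header, data, matches); `matches[t]` after the guaranteed insert is ported as getD t 0 (the key is always present there)
def make_table (listoflists : List (List Int)) : List Int :=
  let header_sz : Int := (listoflists.length : Int)
  let st := listoflists.foldl
    (fun (st : List Int × List Int × PySem.Dict (List Int) Int) t =>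
      let header := st.1
      let dm :=
        if !(st.2.2.contains t) then
          (st.2.1 ++ t ++ [0xFF], st.2.2.insert t (header_sz + (st.2.1.length : Int)))
        else st.2
      (header ++ [dm.2.getD t 0], dm))
    ([], [], PySem.Dict.empty)
  st.1 ++ st.2.1

-- ===== PORT B =====
-- offs-building pass: state = (offs, acc); `t not in listoflists[:i]` is slice membership
def make_table_alt (listoflists : List (List Int)) : List Int :=
  let n : Int := (listoflists.length : Int)
  let p := (PySem.List.enumerate listoflists).foldl
    (fun (st : List Int × Int) it =>
      (st.1 ++ [st.2],
       if it.2 ∈ PySem.List.slice listoflists none (some it.1) then st.2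
       else st.2 + (it.2.length : Int) + 1))
    ([], n)
  -- listoflists.index(t) always succeeds (t ∈ listoflists) and the resulting index is < len(offs),
  -- so the `.getD 0` fallbacks on index? and pyGet? are never taken
  let header := listoflists.map (fun t =>
    (PySem.List.pyGet? p.1 (((PySem.List.index? listoflists t).getD 0 : Nat) : Int)).getD 0)
  let data := (PySem.List.enumerate listoflists).foldl
    (fun d it =>
      if it.2 ∈ PySem.List.slice listoflists none (some it.1) then d
      else d ++ it.2 ++ [0xFF]) []
  header ++ data

-- ===== PRECONDITION & SPEC =====
def Spec_make_table (listoflists : List (List Int)) (out : List Int) : Prop := out = make_table_alt listoflists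
instance (listoflists : List (List Int)) (out : List Int) : Decidable (Spec_make_table listoflists out) := by unfold Spec_make_table; infer_instance

-- ===== CLAIM (what is proved, stated in full; the proofs are below) =====
def Claim_equal_make_table : Prop := ∀ (listoflists : List (List Int)), Dom_make_table listoflists → Spec_make_table listoflists (make_table listoflists)

-- ===== LEMMAS AND PROOFS =====

-- (the two LEAN ports agree on every input; Dom is not needed)

-- A's loop step, named for the proofs (definitionally the lambda in make_table)
def stepA (hsz : Int) (st : List Int × List Int × PySem.Dict (List Int) Int) (t : List Int) :
    List Int × List Int × PySem.Dict (List Int) Int :=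
  let dm :=
    if !(st.2.2.contains t) then
      (st.2.1 ++ t ++ [0xFF], st.2.2.insert t (hsz + (st.2.1.length : Int)))
    else st.2
  (st.1 ++ [dm.2.getD t 0], dm)

-- the flattened data block of a list of unique rows
def blob (us : List (List Int)) : List Int := us.foldl (fun d u => d ++ u ++ [0xFF]) []

-- the canonical offset of row t relative to the first-seen unique list us
def offAt (n : Int) (us : List (List Int)) (t : List Int) : Int :=
  n + ((blob (us.takeWhile (fun u => u != t))).length : Int)

lemma blob_append_singleton (us : List (List Int)) (t : List Int) :
    blob (us ++ [t]) = blob us ++ t ++ [0xFF] := by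
  simp [blob, List.foldl_append]

lemma foldl_add_prefix (rest : List (List Int)) :
    ∀ us : List (List Int), ∃ r, rest.foldl PySem.Set.add us = us ++ r := by
  induction rest with
  | nil => exact fun us => ⟨[], by simp⟩
  | cons t ts ih =>
      intro us
      obtain ⟨r, hr⟩ := ih (PySem.Set.add us t)
      by_cases h : t ∈ us
      · exact ⟨r, by rw [List.foldl_cons, hr, PySem.Set.add_of_mem h]⟩
      · exact ⟨[t] ++ r, by rw [List.foldl_cons, hr, PySem.Set.add_of_not_mem h, List.append_assoc]⟩

lemma tw_stop (us r : List (List Int)) (t : List Int) (h : t ∈ us) :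
    (us ++ r).takeWhile (fun u => u != t) = us.takeWhile (fun u => u != t) := by
  induction us with
  | nil => cases h
  | cons x xs ih =>
      by_cases hx : x = t
      · subst hx; simp
      · simp only [List.cons_append, List.takeWhile_cons, bne_iff_ne, ne_eq, hx,
          not_false_eq_true, if_true]
        have ht : t ∈ xs := by
          rcases List.mem_cons.mp h with he | hm
          · exact absurd he.symm hx
          · exact hm
        simp [ih ht]

lemma tw_exact (us r : List (List Int)) (t : List Int) (h : t ∉ us) :
    (us ++ t :: r).takeWhile (fun u => u != t) = us := by
  induction us with
  | nil => simp
  | cons x xs ih =>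
      have hx : x ≠ t := fun he => h (by simp [he])
      have hxs : t ∉ xs := fun hm => h (by simp [hm])
      simp [hx, ih hxs]

lemma dedup_append_singleton (l : List (List Int)) (x : List Int) :
    PySem.List.dedup (l ++ [x]) =
      if x ∈ l then PySem.List.dedup l else PySem.List.dedup l ++ [x] := by
  simp only [PySem.List.dedup_eq_ofList, PySem.Set.ofList_eq_foldl, List.foldl_append,
    List.foldl_cons, List.foldl_nil]
  by_cases h : x ∈ l
  · rw [PySem.Set.add_of_mem, if_pos h]
    rw [← PySem.Set.ofList_eq_foldl]
    exact (PySem.Set.mem_ofList _ _).mpr h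
  · rw [PySem.Set.add_of_not_mem, if_neg h]
    rw [← PySem.Set.ofList_eq_foldl]
    exact fun hm => h ((PySem.Set.mem_ofList _ _).mp hm)

-- ===== A-side: the interleaved fold computes the canonical header/data =====
lemma A_loop (n : Int) (rest : List (List Int)) :
    ∀ (header : List Int) (us : List (List Int)) (m : PySem.Dict (List Int) Int),
    (∀ k, m.get? k = if k ∈ us then some (offAt n us k) else none) →
    (rest.foldl (stepA n) (header, blob us, m)).1
        = header ++ rest.map (fun t => offAt n (rest.foldl PySem.Set.add us) t) ∧
    (rest.foldl (stepA n) (header, blob us, m)).2.1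
        = blob (rest.foldl PySem.Set.add us) := by
  induction rest with
  | nil => intro header us m _; simp
  | cons t ts ih =>
      intro header us m hm
      rw [List.foldl_cons, List.foldl_cons, List.map_cons]
      by_cases h : t ∈ us
      · have hget : m.get? t = some (offAt n us t) := by rw [hm t, if_pos h]
        have hc : m.contains t = true := by rw [PySem.Dict.contains_eq_isSome_get?, hget]; rfl
        have hstep : stepA n (header, blob us, m) t = (header ++ [offAt n us t], blob us, m) := by
          simp [stepA, hc, PySem.Dict.getD_eq_get?_getD, hget]
        rw [hstep, PySem.Set.add_of_mem h]
        obtain ⟨hd1, hd2⟩ := ih (header ++ [offAt n us t]) us m hm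
        obtain ⟨r, hr⟩ := foldl_add_prefix ts us
        have hoff : offAt n (ts.foldl PySem.Set.add us) t = offAt n us t := by
          rw [hr]; unfold offAt; rw [tw_stop us r t h]
        rw [hd1, hd2, hoff]
        simp
      · have hgetn : m.get? t = none := by rw [hm t, if_neg h]
        have hc : m.contains t = false := by rw [PySem.Dict.contains_eq_isSome_get?, hgetn]; rfl
        have hv : offAt n (us ++ [t]) t = n + ((blob us).length : Int) := by
          unfold offAt
          rw [show us ++ [t] = us ++ t :: [] from rfl, tw_exact us [] t h]
        have hstep : stepA n (header, blob us, m) t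
            = (header ++ [n + ((blob us).length : Int)], blob (us ++ [t]),
               m.insert t (n + ((blob us).length : Int))) := by
          simp [stepA, hc, blob_append_singleton, PySem.Dict.getD_eq_get?_getD,
            PySem.Dict.get?_insert_self]
        have hm' : ∀ k, (m.insert t (n + ((blob us).length : Int))).get? k
            = if k ∈ us ++ [t] then some (offAt n (us ++ [t]) k) else none := by
          intro k
          rw [PySem.Dict.get?_insert]
          by_cases hk : k = t
          · subst hk; rw [if_pos rfl, if_pos (by simp), hv]
          · rw [if_neg hk, hm k]
            by_cases hku : k ∈ us
            · rw [if_pos hku, if_pos (by simp [hku])]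
              unfold offAt; rw [tw_stop us [t] k hku]
            · rw [if_neg hku, if_neg (by simp [hku, hk])]
        rw [hstep, PySem.Set.add_of_not_mem h]
        obtain ⟨hd1, hd2⟩ := ih _ (us ++ [t]) _ hm'
        obtain ⟨r, hr⟩ := foldl_add_prefix ts (us ++ [t])
        have hoff : offAt n (ts.foldl PySem.Set.add (us ++ [t])) t = n + ((blob us).length : Int) := by
          rw [hr]; unfold offAt
          rw [List.append_assoc, List.singleton_append, tw_exact us r t h]
        rw [hd1, hd2, hoff]
        simp

-- ===== B-side: the enumerate folds compute the same =====
lemma offs_fold (L : List (List Int)) :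
    ∀ (l s : List (List Int)), L = l ++ s → ∀ (o : List Int) (c : Int),
    (PySem.List.enumerate l).foldl
      (fun (st : List Int × Int) it =>
        (st.1 ++ [st.2],
         if it.2 ∈ PySem.List.slice L none (some it.1) then st.2
         else st.2 + (it.2.length : Int) + 1)) (o, c)
    = (o ++ (List.range l.length).map
          (fun j => c + ((blob (PySem.List.dedup (l.take j))).length : Int)),
       c + ((blob (PySem.List.dedup l)).length : Int)) := by
  intro l
  induction l using List.reverseRecOn with
  | nil => intro s _ o c; simp [blob]
  | append_singleton l' x ih =>
      intro s hL o c
      have hL' : L = l' ++ ([x] ++ s) := by rw [hL, List.append_assoc]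
      rw [PySem.List.enumerate_append, List.foldl_append, ih ([x] ++ s) hL' o c,
        PySem.List.enumerate_cons, PySem.List.enumerate_nil]
      simp only [List.foldl_cons, List.foldl_nil, zero_add]
      have hsl : PySem.List.slice L none (some ((l'.length : Nat) : Int)) = l' := by
        rw [hL', PySem.List.slice_to_natCast, List.take_left]
      have hmap : (List.range (l' ++ [x]).length).map
            (fun j => c + ((blob (PySem.List.dedup ((l' ++ [x]).take j))).length : Int))
          = (List.range l'.length).map
              (fun j => c + ((blob (PySem.List.dedup (l'.take j))).length : Int))
            ++ [c + ((blob (PySem.List.dedup l')).length : Int)] := by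
        rw [List.length_append, List.length_cons, List.length_nil, List.range_succ,
          List.map_append]
        congr 1
        · apply List.map_congr_left
          intro j hj
          rw [List.take_append_of_le_length (le_of_lt (List.mem_range.mp hj))]
        · simp
      rw [hmap, hsl]
      by_cases hx : x ∈ l'
      · rw [if_pos hx, dedup_append_singleton, if_pos hx]
        simp
      · rw [if_neg hx, dedup_append_singleton, if_neg hx, blob_append_singleton]
        simp only [List.length_append, List.length_cons, List.length_nil, Prod.mk.injEq]
        constructor
        · simp
        · push_cast; ring

lemma data_fold (L : List (List Int)) :
    ∀ (l s : List (List Int)), L = l ++ s → ∀ (d : List Int),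
    (PySem.List.enumerate l).foldl
      (fun (d : List Int) it =>
        if it.2 ∈ PySem.List.slice L none (some it.1) then d
        else d ++ it.2 ++ [0xFF]) d
    = d ++ blob (PySem.List.dedup l) := by
  intro l
  induction l using List.reverseRecOn with
  | nil => intro s _ d; simp [blob]
  | append_singleton l' x ih =>
      intro s hL d
      have hL' : L = l' ++ ([x] ++ s) := by rw [hL, List.append_assoc]
      rw [PySem.List.enumerate_append, List.foldl_append, ih ([x] ++ s) hL' d,
        PySem.List.enumerate_cons, PySem.List.enumerate_nil]
      simp only [List.foldl_cons, List.foldl_nil, zero_add]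
      have hsl : PySem.List.slice L none (some ((l'.length : Nat) : Int)) = l' := by
        rw [hL', PySem.List.slice_to_natCast, List.take_left]
      rw [hsl]
      by_cases hx : x ∈ l'
      · rw [if_pos hx, dedup_append_singleton, if_pos hx]
      · rw [if_neg hx, dedup_append_singleton, if_neg hx, blob_append_singleton]
        simp

lemma header_entry (l : List (List Int)) (t : List Int) (h : t ∈ l) :
    (PySem.List.pyGet?
        ((List.range l.length).map
          (fun j => (l.length : Int) + ((blob (PySem.List.dedup (l.take j))).length : Int)))
        (((PySem.List.index? l t).getD 0 : Nat) : Int)).getD 0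
      = offAt (l.length : Int) (PySem.List.dedup l) t := by
  obtain ⟨k, hk⟩ : ∃ k, PySem.List.index? l t = some k :=
    Option.isSome_iff_exists.mp ((PySem.List.index?_isSome_iff l t).mpr h)
  obtain ⟨pre, suf, hsplit, hlen, hpre⟩ := (PySem.List.index?_eq_some_iff l t k).mp hk
  rw [hk]
  simp only [Option.getD_some]
  rw [PySem.List.pyGet?_natCast]
  have hklt : k < l.length := by rw [hsplit, List.length_append, ← hlen]; simp
  rw [List.getElem?_map, List.getElem?_range hklt]
  simp only [Option.map_some, Option.getD_some]
  have htake : l.take k = pre := by rw [hsplit, ← hlen, List.take_left]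
  rw [htake]
  unfold offAt
  have hnd : t ∉ PySem.List.dedup pre := by
    rw [PySem.List.dedup_eq_ofList]
    exact fun hm => hpre ((PySem.Set.mem_ofList _ _).mp hm)
  obtain ⟨r, hr⟩ := foldl_add_prefix suf (PySem.List.dedup pre ++ [t])
  have h1 : PySem.List.dedup l = (PySem.List.dedup pre ++ [t]) ++ r := by
    rw [PySem.List.dedup_eq_ofList, PySem.Set.ofList_eq_foldl, hsplit,
      show pre ++ t :: suf = (pre ++ [t]) ++ suf by simp, List.foldl_append, List.foldl_append,
      List.foldl_cons, List.foldl_nil, ← PySem.Set.ofList_eq_foldl, ← PySem.List.dedup_eq_ofList,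
      PySem.Set.add_of_not_mem hnd] at *
    exact hr
  rw [h1, List.append_assoc, List.singleton_append,
    tw_exact (PySem.List.dedup pre) r t hnd]

theorem make_table_eq_alt (l : List (List Int)) : make_table l = make_table_alt l := by
  have hmA : ∀ k, (PySem.Dict.empty : PySem.Dict (List Int) Int).get? k
      = if k ∈ ([] : List (List Int)) then some (offAt (l.length : Int) [] k) else none := by
    intro k; simp [PySem.Dict.get?_empty]
  obtain ⟨h1, h2⟩ := A_loop (l.length : Int) l [] [] PySem.Dict.empty hmA
  have hded : l.foldl PySem.Set.add [] = PySem.List.dedup l := by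
    rw [PySem.List.dedup_eq_ofList, PySem.Set.ofList_eq_foldl]
  have hA : make_table l
      = l.map (fun t => offAt (l.length : Int) (PySem.List.dedup l) t)
        ++ blob (PySem.List.dedup l) := by
    show (l.foldl (stepA (l.length : Int)) ([], blob [], PySem.Dict.empty)).1
        ++ (l.foldl (stepA (l.length : Int)) ([], blob [], PySem.Dict.empty)).2.1 = _
    rw [h1, h2, hded, List.nil_append]
  have hoffs := offs_fold l l [] (by simp) [] ((l.length : Int))
  have hdata := data_fold l l [] (by simp) []
  rw [hA]
  show _ = (l.map (fun t =>
      (PySem.List.pyGet?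
        ((PySem.List.enumerate l).foldl
          (fun (st : List Int × Int) it =>
            (st.1 ++ [st.2],
             if it.2 ∈ PySem.List.slice l none (some it.1) then st.2
             else st.2 + (it.2.length : Int) + 1)) ([], (l.length : Int))).1
        (((PySem.List.index? l t).getD 0 : Nat) : Int)).getD 0))
    ++ ((PySem.List.enumerate l).foldl
          (fun (d : List Int) it =>
            if it.2 ∈ PySem.List.slice l none (some it.1) then d
            else d ++ it.2 ++ [0xFF]) [])
  rw [hoffs, hdata, List.nil_append, List.nil_append]
  congr 1
  apply List.map_congr_left
  intro t ht
  exact (header_entry l t ht).symm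

-- ===== VERDICT (by name: the statement is the Claim_ definition above) =====
theorem make_table_spec : Claim_equal_make_table := by
  intro l _
  exact make_table_eq_alt l
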